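-- pv_equiv track=rewrite | github.com/anuragGUPTA2235/Programming-LANG | PYTHON/Accenture/bricks.py | bricks_req
-- ===== SOURCE A (Python) =====
-- def bricks_req(num):
--     base = 2
--     other_base = 5
--     if num == 1:
--         return 2
--     else:
--         for i in range(1,num):
--             base = base + (other_base)
--             other_base += 3
--
--     return base
-- ===== SOURCE B (Python) =====
-- def bricks_req(num):
--     # closed-form arithmetic series: O(1) instead of A's O(n) loop
--     m = num - 1
--     if m <= 0:
--         return 2
--     return 2 + (m * (3 * m + 7)) // 2
-- ===== Notes on version B (the rewrite author's own statement) =====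
-- stated objective: faster
-- what changed: Replaced A's linear accumulation loop over range(1,num) by a closed-form quadratic arithmetic-series formula evaluated in constant time.
import Mathlib
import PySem

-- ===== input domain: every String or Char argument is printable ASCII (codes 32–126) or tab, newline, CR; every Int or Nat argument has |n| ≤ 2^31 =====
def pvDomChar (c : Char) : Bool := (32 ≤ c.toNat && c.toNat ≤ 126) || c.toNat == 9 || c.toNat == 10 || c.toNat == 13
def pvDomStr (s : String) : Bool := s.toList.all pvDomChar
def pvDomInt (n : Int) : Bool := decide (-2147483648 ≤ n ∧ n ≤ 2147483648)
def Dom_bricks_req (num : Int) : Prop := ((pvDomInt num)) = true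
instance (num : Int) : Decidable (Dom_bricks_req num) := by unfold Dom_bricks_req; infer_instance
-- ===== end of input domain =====

-- B replaces A's O(n) accumulation loop by the closed-form arithmetic-series sum (faster, asymptotic).


-- ===== PORT A =====
def bricks_req (num : Int) : Int :=
  if num == 1 then 2
  else
    ((PySem.List.pyRange 1 num 1).foldl
      (fun (s : Int × Int) _ => (s.1 + s.2, s.2 + 3)) (2, 5)).1

-- ===== PORT B =====
def bricks_req_alt (num : Int) : Int :=
  let m := num - 1
  if m ≤ 0 then 2
  else 2 + PySem.Int.floordiv (m * (3 * m + 7)) 2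

-- ===== PRECONDITION & SPEC =====
def Spec_bricks_req (num : Int) (out : Int) : Prop := out = bricks_req_alt num
instance (num : Int) (out : Int) : Decidable (Spec_bricks_req num out) := by unfold Spec_bricks_req; infer_instance

-- ===== CLAIM (what is proved, stated in full; the proofs are below) =====
def Claim_equal_bricks_req : Prop := ∀ (num : Int), Dom_bricks_req num → Spec_bricks_req num (bricks_req num)

-- ===== LEMMAS AND PROOFS =====
-- A's loop body ignores the loop variable; its effect depends only on the list length.
theorem bricksFold (l : List Int) : ∀ b o : Int,
    2 * (l.foldl (fun (s : Int × Int) _ => (s.1 + s.2, s.2 + 3)) (b, o)).1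
      = 2 * b + 2 * o * (l.length : Int) + 3 * (l.length : Int) * ((l.length : Int) - 1) := by
  induction l with
  | nil => intro b o; simp
  | cons x l ih =>
      intro b o
      simp only [List.foldl_cons, List.length_cons]
      rw [ih]
      push_cast
      ring

theorem bricks_even (m : Int) : 2 ∣ m * (3 * m + 7) := by
  rcases Int.even_or_odd m with ⟨k, hk⟩ | ⟨k, hk⟩
  · exact ⟨k * (3 * m + 7), by rw [hk]; ring⟩
  · exact ⟨m * (3 * k + 5), by rw [hk]; ring⟩

-- ===== VERDICT (by name: the statement is the Claim_ definition above) =====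
theorem bricks_req_spec : Claim_equal_bricks_req := by
  intro num _
  unfold Spec_bricks_req bricks_req bricks_req_alt
  by_cases h1 : num = 1
  · subst h1; decide
  · simp only [h1, beq_iff_eq, if_false]
    by_cases h2 : num - 1 ≤ 0
    · have : PySem.List.pyRange 1 num 1 = [] := by
        rw [PySem.List.pyRange_one]
        have : (num - 1).toNat = 0 := by omega
        simp [this]
      simp [this, h2]
    · simp only [h2, if_false]
      set m : Int := num - 1 with hm
      have hlen : ((PySem.List.pyRange 1 num 1).length : Int) = m := by
        rw [PySem.List.length_pyRange_one]; omega
      have hf := bricksFold (PySem.List.pyRange 1 num 1) 2 5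
      rw [hlen] at hf
      have hdvd := bricks_even m
      have hfd : PySem.Int.floordiv (m * (3 * m + 7)) 2 = (m * (3 * m + 7)) / 2 :=
        PySem.Int.floordiv_eq_ediv_of_pos (by omega)
      have hmul : (m * (3 * m + 7)) / 2 * 2 = m * (3 * m + 7) := Int.ediv_mul_cancel hdvd
      rw [hfd]
      have key : 2 * ((PySem.List.pyRange 1 num 1).foldl
          (fun (s : Int × Int) _ => (s.1 + s.2, s.2 + 3)) (2, 5)).1
          = 4 + (m * (3 * m + 7)) / 2 * 2 := by rw [hmul, hf]; ring
      omega
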